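-- pv_equiv track=rewrite | github.com/Nghia03092004/nghia03092004.github.io | project_euler/problem_916/solution.py | edge_orbits_from_cycle_type
-- ===== SOURCE A (Python) =====
-- from math import factorial, gcd
--
-- def edge_orbits_from_cycle_type(cycle_type: tuple) -> int:
--     """Number of edge orbits for a permutation with given cycle type.
--
--     Formula: sum_{i<j} gcd(l_i, l_j) + sum_i floor(l_i / 2)
--     """
--     k = len(cycle_type)
--     c = 0
--     # Inter-cycle edges
--     for i in range(k):
--         for j in range(i + 1, k):
--             c += gcd(cycle_type[i], cycle_type[j])
--     # Intra-cycle edges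
--     for li in cycle_type:
--         c += li // 2
--     return c
-- ===== SOURCE B (Python) =====
-- from math import gcd
--
-- def edge_orbits_from_cycle_type(cycle_type: tuple) -> int:
--     """Number of edge orbits for a permutation with given cycle type.
--
--     Same value as the pairwise formula, computed by grouping equal cycle
--     lengths in a frequency table: pairs of equal lengths contribute
--     C(c, 2) * |v| (since gcd(v, v) == |v|), pairs of distinct lengths
--     contribute c_v * c_w * gcd(v, w), and each cycle adds floor(l / 2).
--     """
--     counts = {}
--     for l in cycle_type:
--         counts[l] = counts.get(l, 0) + 1
--     vals = list(counts)
--     total = 0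
--     for idx, v in enumerate(vals):
--         c = counts[v]
--         total += (c * (c - 1) // 2) * abs(v)
--         for w in vals[idx + 1:]:
--             total += c * counts[w] * gcd(v, w)
--     for l in cycle_type:
--         total += l // 2
--     return total
-- ===== Notes on version B (the rewrite author's own statement) =====
-- stated objective: alternative
-- what changed: Replaced the index-based double loop over all positions with a frequency table: count each cycle length once, add C(c,2)*|v| for equal-length pairs in closed form and c_v*c_w*gcd(v,w) per pair of distinct lengths, so duplicate lengths cost one gcd instead of quadratically many.
import Mathlib
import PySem

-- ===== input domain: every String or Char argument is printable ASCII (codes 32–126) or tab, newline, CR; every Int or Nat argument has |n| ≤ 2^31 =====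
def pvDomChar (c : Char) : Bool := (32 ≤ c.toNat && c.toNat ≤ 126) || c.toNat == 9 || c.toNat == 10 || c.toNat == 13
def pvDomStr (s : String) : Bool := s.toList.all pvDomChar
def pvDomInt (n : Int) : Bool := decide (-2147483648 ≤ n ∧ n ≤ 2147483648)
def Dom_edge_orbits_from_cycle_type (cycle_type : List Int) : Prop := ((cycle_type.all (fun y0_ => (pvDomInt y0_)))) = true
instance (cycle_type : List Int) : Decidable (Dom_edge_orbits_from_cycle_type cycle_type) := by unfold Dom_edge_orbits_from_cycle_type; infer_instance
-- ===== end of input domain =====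

-- B groups equal cycle lengths in a frequency table (C(c,2)·|v| per equal-length pair, c_v·c_w·gcd(v,w) per
-- pair of distinct lengths) instead of A's index-based double loop over all positions; alternative algorithm.

-- ===== PORT A =====
/-- Python's `math.gcd` on two ints: the non-negative gcd of their absolute values (exact, incl. 0/negatives). -/
def pvGcd (x y : Int) : Int := (Int.gcd x y : Int)

def edge_orbits_from_cycle_type (cycle_type : List Int) : Int :=
  let k : Int := cycle_type.length
  let c : Int := 0
  let c := (PySem.List.pyRange 0 k 1).foldl (fun c i =>
      (PySem.List.pyRange (i + 1) k 1).foldl (fun c j =>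
        c + pvGcd (PySem.List.pyGetD cycle_type i 0) (PySem.List.pyGetD cycle_type j 0)) c) c
  cycle_type.foldl (fun c li => c + PySem.Int.floordiv li 2) c

-- ===== PORT B =====
def edge_orbits_from_cycle_type_alt (cycle_type : List Int) : Int :=
  let counts := cycle_type.foldl (fun d l => d.insert l (d.getD l 0 + 1))
      (PySem.Dict.empty : PySem.Dict Int Int)
  let vals := counts.keys
  let total : Int := (PySem.List.enumerate vals).foldl (fun total iv =>
      let c := counts.getD iv.2 0
      let total := total + PySem.Int.floordiv (c * (c - 1)) 2 * (iv.2.natAbs : Int)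
      (PySem.List.slice vals (some (iv.1 + 1)) none).foldl
        (fun total w => total + c * counts.getD w 0 * pvGcd iv.2 w) total) 0
  cycle_type.foldl (fun total l => total + PySem.Int.floordiv l 2) total

-- ===== PRECONDITION & SPEC =====
def Spec_edge_orbits_from_cycle_type (cycle_type : List Int) (out : Int) : Prop := out = edge_orbits_from_cycle_type_alt cycle_type
instance (cycle_type : List Int) (out : Int) : Decidable (Spec_edge_orbits_from_cycle_type cycle_type out) := by unfold Spec_edge_orbits_from_cycle_type; infer_instance

-- ===== CLAIM (what is proved, stated in full; the proofs are below) =====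
def Claim_equal_edge_orbits_from_cycle_type : Prop := ∀ (cycle_type : List Int), Dom_edge_orbits_from_cycle_type cycle_type → Spec_edge_orbits_from_cycle_type cycle_type (edge_orbits_from_cycle_type cycle_type)

-- ===== LEMMAS AND PROOFS =====

/-- Sum of `gcd` over all unordered index pairs, structurally. -/
def pvPairSum : List Int → Int
  | [] => 0
  | x :: xs => (xs.map (fun y => pvGcd x y)).sum + pvPairSum xs

/-- Count-weighted pair sum over a list of distinct values. -/
def pvPairW (cnt : Int → Int) : List Int → Int
  | [] => 0
  | v :: vs => (vs.map (fun w => cnt v * cnt w * pvGcd v w)).sum + pvPairW cnt vs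

/-- Full (ordered) double sum of gcd over a list. -/
def pvFull2 (xs : List Int) : Int := (xs.map (fun y => (xs.map (fun z => pvGcd y z)).sum)).sum

def pvDiag (xs : List Int) : Int := (xs.map (fun y => (y.natAbs : Int))).sum

def pvFullW (cnt : Int → Int) (l : List Int) : Int :=
  (l.map (fun v => (l.map (fun w => cnt v * cnt w * pvGcd v w)).sum)).sum

def pvDiagW (cnt : Int → Int) (l : List Int) : Int :=
  (l.map (fun v => cnt v * cnt v * (v.natAbs : Int))).sum

lemma pvGcd_comm (x y : Int) : pvGcd x y = pvGcd y x := by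
  simp [pvGcd, Int.gcd_comm]

lemma pvGcd_self (x : Int) : pvGcd x x = (x.natAbs : Int) := by
  simp [pvGcd, Int.gcd_self]

lemma two_mul_pairSum (xs : List Int) : 2 * pvPairSum xs = pvFull2 xs - pvDiag xs := by
  induction xs with
  | nil => simp [pvPairSum, pvFull2, pvDiag]
  | cons x t ih =>
    simp only [pvPairSum, pvFull2, pvDiag, List.map_cons, List.sum_cons,
      PySem.List.sum_map_add_int] at *
    have hsym : (t.map (fun y => pvGcd y x)).sum = (t.map (fun y => pvGcd x y)).sum := by
      simp only [pvGcd_comm _ x]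
    rw [pvGcd_self]
    linarith [ih, hsym]

lemma two_mul_pairW (cnt : Int → Int) (l : List Int) :
    2 * pvPairW cnt l = pvFullW cnt l - pvDiagW cnt l := by
  induction l with
  | nil => simp [pvPairW, pvFullW, pvDiagW]
  | cons v vs ih =>
    simp only [pvPairW, pvFullW, pvDiagW, List.map_cons, List.sum_cons,
      PySem.List.sum_map_add_int] at *
    have hfun : (fun y => cnt y * cnt v * pvGcd y v) = fun y => cnt v * cnt y * pvGcd v y :=
      funext fun y => by rw [pvGcd_comm]; ring
    rw [hfun] at *
    rw [pvGcd_self]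
    linarith [ih]

/-- Sum over a list equals the count-weighted sum over its set of distinct values. -/
lemma sum_over_set (xs : List Int) (f : Int → Int) :
    ((PySem.Set.ofList xs).map (fun v => (xs.count v : Int) * f v)).sum = (xs.map f).sum := by
  rw [Finset.sum_list_map_count xs f]
  have hfin : (PySem.Set.ofList xs).toFinset = xs.toFinset := by
    ext v; simp [PySem.Set.mem_ofList]
  rw [← List.sum_toFinset (fun v => (xs.count v : Int) * f v) (PySem.Set.nodup_ofList xs), hfin]
  refine Finset.sum_congr rfl fun m _ => ?_
  simp

/-- Row `i` of A's triangular double loop. -/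
def pvRow (xs : List Int) (i : Nat) : Int :=
  ((xs.drop (i+1)).map (fun y => pvGcd (xs.getD i 0) y)).sum

lemma rows (xs : List Int) :
    ((List.range xs.length).map (pvRow xs)).sum = pvPairSum xs := by
  induction xs with
  | nil => simp [pvPairSum]
  | cons x t ih =>
    rw [List.length_cons, List.range_succ_eq_map, List.map_cons, List.sum_cons]
    have h0 : pvRow (x :: t) 0 = (t.map (fun y => pvGcd x y)).sum := by
      simp [pvRow]
    have hsh : (List.range t.length).map (pvRow (x :: t) ∘ Nat.succ) = (List.range t.length).map (pvRow t) := by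
      refine List.map_congr_left fun i _ => ?_
      simp [pvRow, List.drop_succ_cons, Nat.succ_eq_add_one]
    rw [h0, List.map_map, hsh, ih, pvPairSum]

lemma A_sum_eq_pairSum (xs : List Int) :
    ((PySem.List.pyRange 0 (xs.length : Int) 1).map (fun i =>
      ((PySem.List.pyRange (i + 1) (xs.length : Int) 1).map (fun j =>
        pvGcd (PySem.List.pyGetD xs i 0) (PySem.List.pyGetD xs j 0))).sum)).sum
    = pvPairSum xs := by
  rw [PySem.List.pyRange_zero_natCast, List.map_map, ← rows xs]
  refine congrArg List.sum (List.map_congr_left fun i _ => ?_)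
  have hmap : (PySem.List.pyRange ((i:Int) + 1) (xs.length : Int) 1).map
      (fun j => pvGcd (PySem.List.pyGetD xs (i:Int) 0) (PySem.List.pyGetD xs j 0))
      = ((PySem.List.pyRange ((i:Int) + 1) (xs.length : Int) 1).map
          (fun j => PySem.List.pyGetD xs j 0)).map (pvGcd (PySem.List.pyGetD xs (i:Int) 0)) := by
    rw [List.map_map]; rfl
  rw [Function.comp, hmap, PySem.List.map_pyGetD_pyRange' xs 0 (a := (i:Int)+1) (by positivity)]
  have ht : ((i:Int)+1).toNat = i + 1 := by omega
  rw [ht]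
  simp [pvRow, PySem.List.pyGetD_natCast]

lemma B_loop_aux (cnt tri : Int → Int) (full : List Int) (s : Nat) (t : Int) :
    (PySem.List.enumerate (full.drop s) (s:Int)).foldl (fun total iv =>
      total + tri iv.2 +
        ((PySem.List.slice full (some (iv.1 + 1)) none).map
          (fun w => cnt iv.2 * cnt w * pvGcd iv.2 w)).sum) t
    = t + ((full.drop s).map tri).sum + pvPairW cnt (full.drop s) := by
  induction h : full.drop s generalizing s t with
  | nil => simp [PySem.List.enumerate, pvPairW]
  | cons v rest ih =>
    have hrest : full.drop (s+1) = rest := by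
      rw [← List.tail_drop, h]; rfl
    rw [PySem.List.enumerate_cons, List.foldl_cons]
    conv_lhs => rw [show ((s:Int), v).1 + 1 = ((s+1 : Nat) : Int) by push_cast; ring]
    rw [PySem.List.slice_from_natCast, hrest, ih (s+1) _ hrest]
    simp only [List.map_cons, List.sum_cons, pvPairW]
    ring

lemma B_loop_eq (cnt tri : Int → Int) (full : List Int) :
    (PySem.List.enumerate full).foldl (fun total iv =>
      total + tri iv.2 +
        ((PySem.List.slice full (some (iv.1 + 1)) none).map
          (fun w => cnt iv.2 * cnt w * pvGcd iv.2 w)).sum) 0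
    = (full.map tri).sum + pvPairW cnt full := by
  simpa using B_loop_aux cnt tri full 0 0

lemma pvSum_map_neg (l : List Int) (g : Int → Int) :
    (l.map (fun v => -(g v))).sum = -(l.map g).sum := by
  induction l with
  | nil => simp
  | cons a t ih => simp [ih]; ring

lemma core (xs : List Int) :
    ((PySem.Set.ofList xs).map (fun v => PySem.Int.floordiv ((xs.count v : Int) * ((xs.count v : Int) - 1)) 2 * (v.natAbs : Int))).sum
      + pvPairW (fun v => (xs.count v : Int)) (PySem.Set.ofList xs)
    = pvPairSum xs := by
  set cnt : Int → Int := fun v => (xs.count v : Int) with hcnt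
  set S := PySem.Set.ofList xs with hS
  have h2 : ∀ c : Int, 2 * PySem.Int.floordiv (c * (c - 1)) 2 = c * (c - 1) := by
    intro c
    rw [PySem.Int.floordiv_eq_ediv_of_pos (by norm_num)]
    refine Int.mul_ediv_cancel' ?_
    have := (Int.even_mul_succ_self (c - 1)).two_dvd
    simpa [mul_comm] using this
  have htri : 2 * (S.map (fun v => PySem.Int.floordiv (cnt v * (cnt v - 1)) 2 * (v.natAbs : Int))).sum
      = pvDiagW cnt S - (S.map (fun v => cnt v * (v.natAbs : Int))).sum := by
    rw [← List.sum_map_mul_left]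
    have hmap : (S.map (fun v => 2 * (PySem.Int.floordiv (cnt v * (cnt v - 1)) 2 * (v.natAbs : Int))))
        = S.map (fun v => cnt v * cnt v * (v.natAbs : Int) + -(cnt v * (v.natAbs : Int))) := by
      refine List.map_congr_left fun v _ => ?_
      rw [← mul_assoc, h2 (cnt v)]; ring
    rw [hmap, PySem.List.sum_map_add_int, pvDiagW, pvSum_map_neg]
    ring
  have hfull : pvFullW cnt S = pvFull2 xs := by
    unfold pvFullW pvFull2
    rw [← sum_over_set xs (fun y => (xs.map (fun z => pvGcd y z)).sum)]
    refine congrArg List.sum (List.map_congr_left fun v _ => ?_)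
    rw [← sum_over_set xs (fun z => pvGcd v z), ← List.sum_map_mul_left]
    refine congrArg List.sum (List.map_congr_left fun w _ => ?_)
    ring
  have hdiag : (S.map (fun v => cnt v * (v.natAbs : Int))).sum = pvDiag xs := by
    unfold pvDiag
    rw [← sum_over_set xs (fun y => (y.natAbs : Int))]
  have hW := two_mul_pairW cnt S
  have hP := two_mul_pairSum xs
  have : 2 * (((S.map (fun v => PySem.Int.floordiv (cnt v * (cnt v - 1)) 2 * (v.natAbs : Int))).sum)
      + pvPairW cnt S) = 2 * pvPairSum xs := by
    rw [mul_add, htri, hW, hP, hfull]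
    rw [hdiag] at htri ⊢
    ring
  exact mul_left_cancel₀ (by norm_num : (2:Int) ≠ 0) this

-- ===== VERDICT (by name: the statement is the Claim_ definition above) =====
theorem edge_orbits_from_cycle_type_spec : Claim_equal_edge_orbits_from_cycle_type := by
  intro xs _
  unfold Spec_edge_orbits_from_cycle_type edge_orbits_from_cycle_type edge_orbits_from_cycle_type_alt
  simp only [PySem.Dict.foldl_insert_getD_add_one_eq_counter, PySem.Dict.keys_counter,
    PySem.Dict.getD_counter, PySem.List.foldl_add]
  rw [A_sum_eq_pairSum xs, B_loop_eq (fun v => (xs.count v : Int))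
    (fun v => PySem.Int.floordiv ((xs.count v : Int) * ((xs.count v : Int) - 1)) 2 * (v.natAbs : Int))
    (PySem.Set.ofList xs), core xs, zero_add]
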